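-- pv_equiv track=rewrite | github.com/RubenGuedes/University-Projects | Redes de Computadores/client.py | arranjarInput
-- ===== SOURCE A (Python) =====
-- def arranjarInput( input_string ):
--
--      sinal = 0
--      str_palavra = ""
--      lista_palavras = []
--
--      for index in range(len(input_string)):
--           if input_string[index] != " ":
--                str_palavra += input_string[index]
--                sinal = 0
--
--           else:
--                if input_string[index] == " ":
--                     sinal = sinal + 1
--                if sinal == 1:
--                     lista_palavras.append(str_palavra)
--                     str_palavra = ""
--
--      if str_palavra != " ":
--           lista_palavras.append(str_palavra)
--
--      return lista_palavras
-- ===== SOURCE B (Python) =====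
-- def arranjarInput(input_string):
--     # Collapse every run of spaces down to a single space, then split on it.
--     collapsed = ""
--     prev = None
--     for c in input_string:
--         if c != ' ' or prev != ' ':
--             collapsed += c
--         prev = c
--     return collapsed.split(' ')
-- ===== Notes on version B (the rewrite author's own statement) =====
-- stated objective: idiomatic
-- what changed: B collapses every run of spaces to a single space in one normalization pass and then splits the collapsed string on the space character, instead of A's word-accumulating sinal/str_palavra state machine that appends tokens as it scans.
import Mathlib
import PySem

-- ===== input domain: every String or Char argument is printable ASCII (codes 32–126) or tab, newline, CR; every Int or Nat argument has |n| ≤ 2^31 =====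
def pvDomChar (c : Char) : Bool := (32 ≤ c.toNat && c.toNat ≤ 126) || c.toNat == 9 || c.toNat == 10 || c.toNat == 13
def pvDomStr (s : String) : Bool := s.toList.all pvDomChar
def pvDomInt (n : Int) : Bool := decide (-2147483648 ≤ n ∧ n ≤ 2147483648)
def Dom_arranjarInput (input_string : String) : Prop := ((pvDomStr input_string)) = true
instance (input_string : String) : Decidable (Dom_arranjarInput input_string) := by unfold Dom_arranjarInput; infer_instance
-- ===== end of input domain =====

-- B collapses every run of spaces to a single space in one pass and then splits on the space character,
-- instead of A's word-accumulating sinal/str_palavra state machine; same return value.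

-- ===== PORT A =====
-- loop state = (sinal, str_palavra as a char list, lista_palavras); the for-loop over
-- range(len(input_string)) reading input_string[index] is the foldl over the characters.
def arranjarInputStep (st : Int × List Char × List String) (c : Char) :
    Int × List Char × List String :=
  let (sinal, word, lst) := st
  if c ≠ ' ' then (0, word ++ [c], lst)
  else
    let sinal' := if c = ' ' then sinal + 1 else sinal
    if sinal' = 1 then (sinal', [], lst ++ [String.ofList word]) else (sinal', word, lst)

def arranjarInput (input_string : String) : List String :=
  let st := input_string.toList.foldl arranjarInputStep (0, [], [])
  -- if str_palavra != " " (string comparison, done on the underlying char list)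
  if st.2.1 ≠ [' '] then st.2.2 ++ [String.ofList st.2.1] else st.2.2

-- ===== PORT B =====
-- loop state = (collapsed as a char list, prev : Option Char); collapsed.split(' ') is
-- PySem.Chars.splitOn collapsed [' '] (exact for this non-empty separator), as strings.
def arranjarInputAltStep (st : List Char × Option Char) (c : Char) :
    List Char × Option Char :=
  let (collapsed, prev) := st
  (if c ≠ ' ' ∨ prev ≠ some ' ' then collapsed ++ [c] else collapsed, some c)

def arranjarInput_alt (input_string : String) : List String :=
  let collapsed := (input_string.toList.foldl arranjarInputAltStep ([], none)).1
  (PySem.Chars.splitOn collapsed [' ']).map String.ofList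

-- ===== PRECONDITION & SPEC =====
def Spec_arranjarInput (input_string : String) (out : List String) : Prop := out = arranjarInput_alt input_string
instance (input_string : String) (out : List String) : Decidable (Spec_arranjarInput input_string out) := by unfold Spec_arranjarInput; infer_instance

-- ===== CLAIM (what is proved, stated in full; the proofs are below) =====
def Claim_equal_arranjarInput : Prop := ∀ (input_string : String), Dom_arranjarInput input_string → Spec_arranjarInput input_string (arranjarInput input_string)

-- ===== LEMMAS AND PROOFS =====

-- specification of split on the single-character separator ' '
def spc : List Char → List (List Char)
  | [] => [[]]
  | c :: cs =>
    if c = ' ' then [] :: spc cs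
    else match spc cs with
      | [] => [[c]]
      | h :: t => (c :: h) :: t

theorem spc_ne_nil (cs : List Char) : spc cs ≠ [] := by
  cases cs with
  | nil => simp [spc]
  | cons c cs =>
    simp only [spc]
    split
    · simp
    · split <;> simp

theorem splitOn_go_eq (fuel : Nat) :
    ∀ (l cur : List Char) (accl : List (List Char)), l.length ≤ fuel →
    PySem.Chars.splitOn.go [' '] fuel l cur accl =
      accl.reverse ++ (match spc l with
        | [] => [cur.reverse]
        | h :: t => (cur.reverse ++ h) :: t) := by
  induction fuel with
  | zero =>
    intro l cur accl hl
    have : l = [] := by cases l <;> simp_all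
    subst this
    simp [PySem.Chars.splitOn.go, spc]
  | succ fuel ih =>
    intro l cur accl hl
    cases l with
    | nil => simp [PySem.Chars.splitOn.go, spc]
    | cons c rest =>
      simp only [PySem.Chars.splitOn.go]
      by_cases hc : c = ' '
      · subst hc
        rw [if_pos (by simp [List.isPrefixOf])]
        have hdrop : List.drop [' '].length (' ' :: rest) = rest := rfl
        rw [hdrop, ih _ _ _ (by simpa using Nat.le_of_succ_le_succ hl)]
        simp only [spc]
        cases h : spc rest with
        | nil => exact absurd h (spc_ne_nil rest)
        | cons h2 t =>
          simp only [List.reverse_cons, List.reverse_nil, List.nil_append,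
            List.append_assoc, List.cons_append, List.singleton_append]
          rw [if_pos trivial]; simp
      · rw [if_neg (by simp [List.isPrefixOf, Ne.symm hc])]
        rw [ih _ _ _ (by simpa using Nat.le_of_succ_le_succ hl)]
        simp only [spc, if_neg hc]
        cases h : spc rest with
        | nil => exact absurd h (spc_ne_nil rest)
        | cons h2 t =>
          simp only [List.reverse_cons, List.nil_append,
            List.append_assoc, List.cons_append, List.singleton_append]

theorem splitOn_eq_spc (cs : List Char) :
    PySem.Chars.splitOn cs [' '] = spc cs := by
  show PySem.Chars.splitOn.go _ _ _ _ _ = _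
  rw [splitOn_go_eq (cs.length + 1) cs [] [] (by omega)]
  cases h : spc cs with
  | nil => exact absurd h (spc_ne_nil cs)
  | cons h2 t => simp

-- A's tokens: Aw w cs = tokens produced from state (sinal = 0, current word w);
-- As cs = tokens produced right after a separator (sinal ≥ 1, current word empty).
mutual
def Aw : List Char → List Char → List (List Char)
  | w, [] => [w]
  | w, c :: cs => if c = ' ' then w :: As cs else Aw (w ++ [c]) cs
def As : List Char → List (List Char)
  | [] => [[]]
  | c :: cs => if c = ' ' then As cs else Aw [c] cs
end

-- B's collapsed remainder: go2 sp cs with sp = "the previous character was a space"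
def go2 : Bool → List Char → List Char
  | _, [] => []
  | sp, c :: cs => (if c = ' ' ∧ sp then [] else [c]) ++ go2 (c = ' ') cs

theorem foldB_eq (cs : List Char) :
    ∀ (acc : List Char) (prev : Option Char),
    (cs.foldl arranjarInputAltStep (acc, prev)).1 =
      acc ++ go2 (prev = some ' ') cs := by
  induction cs with
  | nil => intro acc prev; simp [go2]
  | cons c cs ih =>
    intro acc prev
    simp only [List.foldl_cons, arranjarInputAltStep]
    by_cases h : c = ' ' ∧ prev = some ' '
    · obtain ⟨hc, hp⟩ := h
      subst hc; subst hp
      rw [if_neg (by simp)]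
      rw [ih acc (some ' ')]
      simp [go2]
    · rw [if_pos (by tauto)]
      rw [ih (acc ++ [c]) (some c)]
      by_cases hc : c = ' ' <;> simp_all [go2]

theorem A_tokens_eq_spc_go2 (cs : List Char) :
    (∀ w, Aw w cs = (match spc (go2 false cs) with
        | [] => [w]
        | h :: t => (w ++ h) :: t))
    ∧ As cs = spc (go2 true cs) := by
  induction cs with
  | nil => constructor <;> simp [Aw, As, go2, spc]
  | cons c cs ih =>
    obtain ⟨ihw, ihs⟩ := ih
    by_cases hc : c = ' '
    · subst hc
      constructor
      · intro w
        rw [show Aw w (' ' :: cs) = w :: As cs from by simp [Aw], ihs]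
        have : go2 false (' ' :: cs) = ' ' :: go2 true cs := by simp [go2]
        rw [this, show spc (' ' :: go2 true cs) = [] :: spc (go2 true cs) from by simp [spc]]
        simp
      · rw [show As (' ' :: cs) = As cs from by simp [As], ihs]
        have : go2 true (' ' :: cs) = go2 true cs := by simp [go2]
        rw [this]
    · have hg : ∀ b, go2 b (c :: cs) = c :: go2 false cs := by
        intro b; simp [go2, hc]
      have hsp : ∀ h t, spc (go2 false cs) = h :: t →
          spc (c :: go2 false cs) = (c :: h) :: t := by
        intro h t hht; simp [spc, hc, hht]
      cases hrec : spc (go2 false cs) with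
      | nil => exact absurd hrec (spc_ne_nil _)
      | cons h t =>
        constructor
        · intro w
          rw [show Aw w (c :: cs) = Aw (w ++ [c]) cs from by simp [Aw, hc], ihw, hrec,
            hg false, hsp h t hrec]
          simp
        · rw [show As (c :: cs) = Aw [c] cs from by simp [As, hc], ihw, hrec,
            hg true, hsp h t hrec]
          simp

theorem foldA_eq (cs : List Char) :
    ∀ (acc : List String),
    (∀ w : List Char, ' ' ∉ w →
      (let st := cs.foldl arranjarInputStep (0, w, acc)
       if st.2.1 ≠ [' '] then st.2.2 ++ [String.ofList st.2.1] else st.2.2)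
        = acc ++ (Aw w cs).map String.ofList)
    ∧ (∀ n : Int, 1 ≤ n →
      (let st := cs.foldl arranjarInputStep (n, [], acc)
       if st.2.1 ≠ [' '] then st.2.2 ++ [String.ofList st.2.1] else st.2.2)
        = acc ++ (As cs).map String.ofList) := by
  induction cs with
  | nil =>
    intro acc
    constructor
    · intro w hw
      have hwne : w ≠ [' '] := by rintro rfl; simp at hw
      simp [Aw, hwne]
    · intro n hn
      simp [As]
  | cons c cs ih =>
    intro acc
    constructor
    · intro w hw
      by_cases hc : c = ' '
      · subst hc
        have hstep : arranjarInputStep (0, w, acc) ' ' = (1, [], acc ++ [String.ofList w]) := by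
          simp [arranjarInputStep]
        simp only [List.foldl_cons, hstep]
        rw [(ih (acc ++ [String.ofList w])).2 1 (le_refl 1)]
        simp [Aw]
      · have hstep : arranjarInputStep (0, w, acc) c = (0, w ++ [c], acc) := by
          simp [arranjarInputStep, hc]
        simp only [List.foldl_cons, hstep]
        rw [(ih acc).1 (w ++ [c]) (by simp [hw, Ne.symm hc])]
        simp [Aw, hc]
    · intro n hn
      by_cases hc : c = ' '
      · subst hc
        have hstep : arranjarInputStep (n, [], acc) ' ' = (n + 1, [], acc) := by
          simp [arranjarInputStep]; omega
        simp only [List.foldl_cons, hstep]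
        rw [(ih acc).2 (n + 1) (by omega)]
        simp [As]
      · have hstep : arranjarInputStep (n, [], acc) c = (0, [c], acc) := by
          simp [arranjarInputStep, hc]
        simp only [List.foldl_cons, hstep]
        rw [(ih acc).1 [c] (by simp [Ne.symm hc])]
        simp [As, hc]

theorem arranjarInput_eq_alt (s : String) : arranjarInput s = arranjarInput_alt s := by
  have hA : arranjarInput s = (Aw [] s.toList).map String.ofList := by
    have := (foldA_eq s.toList []).1 [] (by simp)
    simpa [arranjarInput] using this
  rw [hA]
  unfold arranjarInput_alt
  rw [foldB_eq s.toList [] none]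
  simp only [List.nil_append, reduceCtorEq, decide_false]
  rw [splitOn_eq_spc]
  rw [(A_tokens_eq_spc_go2 s.toList).1 []]
  cases hrec : spc (go2 false s.toList) with
  | nil => exact absurd hrec (spc_ne_nil _)
  | cons h t => simp

-- ===== VERDICT (by name: the statement is the Claim_ definition above) =====
theorem arranjarInput_spec : Claim_equal_arranjarInput := by
  intro s _hdom
  exact arranjarInput_eq_alt s
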